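-- pv_equiv track=rewrite | github.com/c0mput3r5c13nt15t/cybersecurity | crypto/digital_skytale/digital-skytale.py | decrypt_skytale
-- ===== SOURCE A (Python) =====
-- def decrypt_skytale(ciphertext: str, key: int) -> str:
--     # Calculate the number of rows in the cipher
--     num_rows = (len(ciphertext) // key) + 1
--
--     # Calculate the number of empty cells in the last row
--     num_empty_cells = (num_rows * key) - len(ciphertext)
--
--     # Create a 2D array to store the characters in the correct positions
--     matrix = [["" for _ in range(num_rows)] for _ in range(key)]
--
--     # Fill the last num_empty_cells with the character ' '
--     for i in range(num_empty_cells):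
--         matrix[key - i - 1][-1] = "#"
--
--     # Fill in the matrix with the ciphertext characters
--     index = 0
--     for i in range(key):
--         for j in range(num_rows):
--             if matrix[i][j] == "#":
--                 continue
--             matrix[i][j] = ciphertext[index]
--             index += 1
--
--     # Read the matrix column by column to get the plaintext
--     plaintext = "".join(matrix[i][j] for j in range(num_rows) for i in range(key))
--
--     return plaintext[: len(ciphertext)]
-- ===== SOURCE B (Python) =====
-- def decrypt_skytale(ciphertext: str, key: int) -> str:
--     n = len(ciphertext)
--     num_rows = n // key + 1
--     num_full = n % key  # rows that get num_rows chars; the remaining rows get num_rows - 1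
--     rows = []
--     pos = 0
--     for i in range(key):
--         length = num_rows if i < num_full else num_rows - 1
--         rows.append(ciphertext[pos:pos + length])
--         pos += length
--     return "".join(rows[i][j] for j in range(num_rows) for i in range(key) if j < len(rows[i]))
-- ===== Notes on version B (the rewrite author's own statement) =====
-- stated objective: simpler
-- what changed: B slices the ciphertext sequentially into the key row strings (full rows of length n//key+1 first, short rows after) and joins them column-major skipping missing cells, instead of allocating a 2D matrix, marking empty cells with a '#' sentinel, filling it cell by cell and truncating the joined result.
import Mathlib
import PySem

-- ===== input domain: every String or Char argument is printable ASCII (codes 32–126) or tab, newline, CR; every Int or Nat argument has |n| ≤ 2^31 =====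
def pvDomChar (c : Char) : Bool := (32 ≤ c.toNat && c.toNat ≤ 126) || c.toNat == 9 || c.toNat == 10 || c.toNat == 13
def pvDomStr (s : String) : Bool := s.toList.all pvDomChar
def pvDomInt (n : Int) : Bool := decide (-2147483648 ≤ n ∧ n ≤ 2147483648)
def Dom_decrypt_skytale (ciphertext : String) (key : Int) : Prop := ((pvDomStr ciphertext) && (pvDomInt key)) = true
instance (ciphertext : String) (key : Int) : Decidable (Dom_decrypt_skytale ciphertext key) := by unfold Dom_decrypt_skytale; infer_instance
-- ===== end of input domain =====

-- B replaces A's sentinel-marked 2D matrix with sequential row slices joined column-major (simpler).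
-- Pre_ excludes key = 0, where Python A raises ZeroDivisionError (B raises too).

-- ===== PORT A =====
-- Port of A.  Loop counters are Nats (k := key.toNat): exact for key ≥ 1; for key < 0 the Python
-- code's loops are all over empty ranges and it returns "", which k = 0 reproduces (all loops empty,
-- join over zero rows = "").  ciphertext[index] is in range whenever Python reaches it (index counts
-- exactly the non-'#' cells, of which there are len(ciphertext)); the getD ' ' default is never hit.
def decrypt_skytale (ciphertext : String) (key : Int) : String :=
  let l := ciphertext.toList
  let n := l.length
  let k := key.toNat
  let r := n / k + 1                 -- num_rows
  let e := r * k - n                 -- num_empty_cells (Nat subtraction; r*k ≥ n for k ≥ 1, and e = 0 for k = 0)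
  let m0 : List (List String) := List.replicate k (List.replicate r "")
  -- mark the last e cells of the last column with "#" (matrix[key-i-1][-1] = "#")
  let m1 := (List.range e).foldl
      (fun m i => m.set (k - i - 1) (((m.getD (k - i - 1) []).set (r - 1) "#"))) m0
  -- fill the matrix row by row, skipping "#" cells, threading the running index
  let st := (List.range k).foldl (fun (st : List (List String) × Nat) i =>
      (List.range r).foldl (fun (st : List (List String) × Nat) j =>
        if (st.1.getD i []).getD j "" == "#" then st
        else (st.1.set i ((st.1.getD i []).set j (String.ofList [l.getD st.2 ' '])), st.2 + 1)) st) (m1, 0)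
  -- "".join of the cells read column by column, then the slice [: len(ciphertext)]
  let plaintext := PySem.Str.join "" ((List.range r).flatMap (fun j =>
      (List.range k).map (fun i => (st.1.getD i []).getD j "")))
  String.ofList (plaintext.toList.take n)

-- ===== PORT B =====
-- Port of Source B: slice the ciphertext into `key` consecutive rows (first n % key rows of length
-- num_rows, the rest of length num_rows - 1), then "".join the cells column-major, keeping rows[i][j]
-- only when j < len(rows[i]) ("if j < len(rows[i])" + indexing = [j]?, joined via filterMap).
-- Same Nat-counter convention as the port of A (exact for key ≠ 0).
def decrypt_skytale_alt (ciphertext : String) (key : Int) : String :=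
  let l := ciphertext.toList
  let n := l.length
  let k := key.toNat
  let r := n / k + 1                 -- num_rows
  let f := n % k                     -- num_full
  let st := (List.range k).foldl (fun (st : List (List Char) × Nat) i =>
      let len := if i < f then r else r - 1
      (st.1 ++ [(l.drop st.2).take len], st.2 + len)) ([], 0)
  String.ofList ((List.range r).flatMap (fun j =>
      (List.range k).filterMap (fun i => (st.1.getD i [])[j]?)))

-- ===== PRECONDITION & SPEC =====
-- Python A raises ZeroDivisionError exactly when key = 0 (and so does B): key = 0 is excluded.
def Pre_decrypt_skytale (ciphertext : String) (key : Int) : Prop := key ≠ 0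
instance (ciphertext : String) (key : Int) : Decidable (Pre_decrypt_skytale ciphertext key) := by
  unfold Pre_decrypt_skytale; infer_instance
def pvWitness_decrypt_skytale : String × Int := ("HWOelRLlDo", 2)

def Spec_decrypt_skytale (ciphertext : String) (key : Int) (out : String) : Prop := out = decrypt_skytale_alt ciphertext key
instance (ciphertext : String) (key : Int) (out : String) : Decidable (Spec_decrypt_skytale ciphertext key out) := by unfold Spec_decrypt_skytale; infer_instance

-- ===== CLAIM (what is proved, stated in full; the proofs are below) =====
def Claim_equal_decrypt_skytale : Prop := ∀ (ciphertext : String) (key : Int), Dom_decrypt_skytale ciphertext key → Pre_decrypt_skytale ciphertext key → Spec_decrypt_skytale ciphertext key (decrypt_skytale ciphertext key)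

-- ===== LEMMAS AND PROOFS =====

def pvLen (r f i : Nat) : Nat := if i < f then r else r - 1
def pvStart (r f : Nat) : Nat → Nat
  | 0 => 0
  | i + 1 => pvStart r f i + pvLen r f i
def pvChunk (l : List Char) (r f i : Nat) : List Char := (l.drop (pvStart r f i)).take (pvLen r f i)
def pvSing (c : Char) : String := String.ofList [c]
def pvInit (r f i : Nat) : List String :=
  if i < f then List.replicate r "" else List.replicate (r - 1) "" ++ ["#"]
def pvPart (l : List Char) (r f i j : Nat) : List String :=
  ((pvChunk l r f i).take j).map pvSing ++
    (if i < f then List.replicate (r - j) "" else List.replicate (r - 1 - j) "" ++ ["#"])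
def pvFinal (l : List Char) (r f i : Nat) : List String :=
  (pvChunk l r f i).map pvSing ++ (if i < f then [] else ["#"])
theorem pvStart_closed (r f m : Nat) :
    pvStart r f m = min m f * r + (m - min m f) * (r - 1) := by
  induction m with
  | zero => simp [pvStart]
  | succ m ih =>
    rw [pvStart, ih, pvLen]
    by_cases h : m < f
    · have h1 : min m f = m := by omega
      have h2 : min (m+1) f = m + 1 := by omega
      simp [h, h1, h2, Nat.succ_mul]
    · have h1 : min m f = f := by omega
      have h2 : min (m+1) f = f := by omega
      have h3 : m + 1 - f = (m - f) + 1 := by omega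
      simp [h, h1, h2, h3, Nat.succ_mul]
      ring

theorem pvStart_mono (r f : Nat) {a b : Nat} (h : a ≤ b) : pvStart r f a ≤ pvStart r f b := by
  induction b with
  | zero => simp_all
  | succ b ih =>
    rcases Nat.lt_succ_iff_lt_or_eq.mp (Nat.lt_succ_of_le h) with h1 | h1
    · exact le_trans (ih (by omega)) (by rw [pvStart]; omega)
    · subst h1; rfl

theorem pv_getD_map_range {α : Type} (g : Nat → α) (k i : Nat) (d : α) (h : i < k) :
    ((List.range k).map g).getD i d = g i := by
  simp [List.getD, h]
theorem pv_set_map_range {α : Type} (g : Nat → α) (k i : Nat) (x : α) :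
    ((List.range k).map g).set i x = (List.range k).map (fun t => if t = i then x else g t) := by
  apply List.ext_getElem
  · simp
  · intro m h1 h2
    simp at h1
    rw [List.getElem_set]
    by_cases h3 : m = i
    · simp [h3]
    · simp [h3, Ne.symm h3]
theorem pv_map_range_congr {α : Type} (g g' : Nat → α) (k : Nat) (h : ∀ t, t < k → g t = g' t) :
    (List.range k).map g = (List.range k).map g' := by
  apply List.map_congr_left; intro t ht; exact h t (List.mem_range.mp ht)
theorem pvChunk_length (l : List Char) (r f i : Nat)
    (hb : pvStart r f i + pvLen r f i ≤ l.length) :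
    (pvChunk l r f i).length = pvLen r f i := by
  simp [pvChunk]; omega
theorem pvChunk_getElem? (l : List Char) (r f i j : Nat) (hj : j < pvLen r f i)
    (hb : pvStart r f i + pvLen r f i ≤ l.length) :
    (pvChunk l r f i)[j]? = l[pvStart r f i + j]? := by
  simp [pvChunk, List.getElem?_drop, hj]

-- the partially-filled row: cell j is still blank, setting it appends the next character
theorem pvPart_getD_blank (l : List Char) (r f i j : Nat) (hj : j < pvLen r f i)
    (hlen : (pvChunk l r f i).length = pvLen r f i) :
    (pvPart l r f i j).getD j "" = "" := by
  have hpre : (((pvChunk l r f i).take j).map pvSing).length = j := by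
    simp [hlen]; omega
  rw [pvPart, List.getD_eq_getElem?_getD, List.getElem?_append_right (by omega), hpre]
  simp only [Nat.sub_self]
  by_cases h : i < f
  · rw [if_pos h]
    have : r - j > 0 := by simp [pvLen, h] at hj; omega
    cases hr : r - j with
    | zero => omega
    | succ m => simp [List.replicate_succ]
  · rw [if_neg h]
    have : r - 1 - j > 0 := by simp [pvLen, h] at hj; omega
    cases hr : r - 1 - j with
    | zero => omega
    | succ m => simp [List.replicate_succ]

theorem pvPart_set (l : List Char) (r f i j : Nat) (hj : j < pvLen r f i)
    (hb : pvStart r f i + pvLen r f i ≤ l.length) :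
    (pvPart l r f i j).set j (String.ofList [l.getD (pvStart r f i + j) ' ']) =
      pvPart l r f i (j + 1) := by
  have hlen := pvChunk_length l r f i hb
  have hpre : (((pvChunk l r f i).take j).map pvSing).length = j := by
    simp [hlen]; omega
  have hchar : (pvChunk l r f i)[j]? = some (l.getD (pvStart r f i + j) ' ') := by
    rw [pvChunk_getElem? l r f i j hj hb, List.getD_eq_getElem?_getD]
    have : pvStart r f i + j < l.length := by omega
    simp [this]
  have htake : (pvChunk l r f i).take (j + 1) =
      (pvChunk l r f i).take j ++ [l.getD (pvStart r f i + j) ' '] := by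
    rw [List.take_succ, hchar]; rfl
  rw [pvPart, List.set_append, if_neg (by omega), hpre, Nat.sub_self]
  rw [pvPart, htake]
  simp only [List.map_append, List.map_cons, List.map_nil, List.append_assoc]
  congr 1
  by_cases h : i < f
  · rw [if_pos h, if_pos h]
    have : r - j > 0 := by simp [pvLen, h] at hj; omega
    cases hr : r - j with
    | zero => omega
    | succ m =>
      have : r - (j + 1) = m := by omega
      simp [List.replicate_succ, this, pvSing]
  · rw [if_neg h, if_neg h]
    have : r - 1 - j > 0 := by simp [pvLen, h] at hj; omega
    cases hr : r - 1 - j with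
    | zero => omega
    | succ m =>
      have : r - 1 - (j + 1) = m := by omega
      simp [List.replicate_succ, this, pvSing]

theorem pvPart_zero (l : List Char) (r f i : Nat) : pvPart l r f i 0 = pvInit r f i := by
  simp [pvPart, pvInit]

theorem pvPart_last_full (l : List Char) (r f i : Nat) (h : i < f)
    (hlen : (pvChunk l r f i).length = pvLen r f i) :
    pvPart l r f i r = pvFinal l r f i := by
  rw [pvPart, pvFinal, if_pos h, if_pos h]
  rw [List.take_of_length_le (by simp [hlen, pvLen, h]), Nat.sub_self]
  simp

theorem pvPart_last_short (l : List Char) (r f i : Nat) (h : ¬ i < f)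
    (hlen : (pvChunk l r f i).length = pvLen r f i) :
    pvPart l r f i (r - 1) = pvFinal l r f i := by
  rw [pvPart, pvFinal, if_neg h, if_neg h]
  rw [List.take_of_length_le (by simp [hlen, pvLen, h]), Nat.sub_self]
  simp
theorem pvB_fold (l : List Char) (r f : Nat) (m : Nat) :
    (List.range m).foldl (fun (st : List (List Char) × Nat) i =>
        let len := if i < f then r else r - 1
        (st.1 ++ [(l.drop st.2).take len], st.2 + len)) ([], 0)
      = ((List.range m).map (pvChunk l r f), pvStart r f m) := by
  induction m with
  | zero => simp [pvStart]
  | succ m ih =>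
    rw [List.range_succ, List.foldl_append, ih]
    simp [pvChunk, pvStart, pvLen, List.range_succ]

theorem pv_replicate_set_last {α : Type} (m : Nat) (x y : α) (hm : 0 < m) :
    (List.replicate m x).set (m - 1) y = List.replicate (m - 1) x ++ [y] := by
  apply List.ext_getElem
  · simp; omega
  · intro t h1 h2
    rw [List.getElem_set]
    simp at h1
    by_cases ht : t < m - 1
    · simp [ht]; omega
    · have : t = m - 1 := by omega
      simp [this]

theorem pvA_mark (k r f : Nat) (hf : f ≤ k) (hr : 0 < r) :
    (List.range (k - f)).foldl
        (fun m i => m.set (k - i - 1) (((m.getD (k - i - 1) []).set (r - 1) "#")))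
        (List.replicate k (List.replicate r ""))
      = (List.range k).map (pvInit r f) := by
  have key : ∀ e, e ≤ k →
      (List.range e).foldl
        (fun m i => m.set (k - i - 1) (((m.getD (k - i - 1) []).set (r - 1) "#")))
        (List.replicate k (List.replicate r ""))
      = (List.range k).map (fun i => if k - e ≤ i then List.replicate (r - 1) "" ++ ["#"]
          else List.replicate r "") := by
    intro e he
    induction e with
    | zero =>
      apply List.ext_getElem
      · simp
      · intro t h1 h2
        simp at h1 ⊢
        omega
    | succ e ih =>
      rw [List.range_succ, List.foldl_append, ih (by omega)]
      simp only [List.foldl_cons, List.foldl_nil]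
      rw [pv_getD_map_range _ _ _ _ (by omega)]
      have hcond : ¬ (k - e ≤ k - e - 1) := by omega
      rw [if_neg hcond]
      rw [pv_replicate_set_last _ _ _ hr, pv_set_map_range]
      apply pv_map_range_congr
      intro t ht
      by_cases h1 : t = k - e - 1
      · simp [h1]; omega
      · simp only [if_neg h1]
        by_cases h2 : k - e ≤ t
        · rw [if_pos h2, if_pos (by omega)]
        · rw [if_neg h2, if_neg (by omega)]
  rw [key (k - f) (by omega)]
  apply pv_map_range_congr
  intro t ht
  rw [pvInit]
  by_cases h1 : t < f
  · rw [if_neg (by omega), if_pos h1]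
  · rw [if_pos (by omega), if_neg h1]

theorem pvA_fillrow (l : List Char) (r f k i : Nat) (hik : i < k) (hr : 0 < r)
    (hb : pvStart r f (i + 1) ≤ l.length) :
    (List.range r).foldl (fun (st : List (List String) × Nat) j =>
        if (st.1.getD i []).getD j "" == "#" then st
        else (st.1.set i ((st.1.getD i []).set j (String.ofList [l.getD st.2 ' '])), st.2 + 1))
      ((List.range k).map (fun t => if t < i then pvFinal l r f t else pvInit r f t), pvStart r f i)
      = ((List.range k).map (fun t => if t < i + 1 then pvFinal l r f t else pvInit r f t),
         pvStart r f (i + 1)) := by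
  have hb' : pvStart r f i + pvLen r f i ≤ l.length := by rw [pvStart] at hb; exact hb
  have hlen := pvChunk_length l r f i hb'
  -- invariant up to j ≤ pvLen r f i
  have inv : ∀ j, j ≤ pvLen r f i →
      (List.range j).foldl (fun (st : List (List String) × Nat) j =>
        if (st.1.getD i []).getD j "" == "#" then st
        else (st.1.set i ((st.1.getD i []).set j (String.ofList [l.getD st.2 ' '])), st.2 + 1))
      ((List.range k).map (fun t => if t < i then pvFinal l r f t else pvInit r f t), pvStart r f i)
      = ((List.range k).map (fun t => if t < i then pvFinal l r f t
           else if t = i then pvPart l r f i j else pvInit r f t), pvStart r f i + j) := by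
    intro j hj
    induction j with
    | zero =>
      simp only [List.range_zero, List.foldl_nil, Nat.add_zero]
      simp only [Prod.mk.injEq]
      refine ⟨?_, trivial⟩
      apply pv_map_range_congr
      intro t ht
      by_cases h1 : t < i
      · simp [h1]
      · by_cases h2 : t = i
        · simp [h1, h2, pvPart_zero]
        · simp [h1, h2]
    | succ j ih =>
      have hjlt : j < pvLen r f i := by omega
      rw [List.range_succ, List.foldl_append, ih (by omega)]
      simp only [List.foldl_cons, List.foldl_nil]
      have hrow : ∀ (d : List String),
          ((List.range k).map (fun t => if t < i then pvFinal l r f t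
            else if t = i then pvPart l r f i j else pvInit r f t)).getD i d
          = pvPart l r f i j := by
        intro d
        rw [pv_getD_map_range _ _ _ _ hik]
        simp
      rw [hrow]
      rw [pvPart_getD_blank l r f i j hjlt hlen]
      have hne : (("" : String) == "#") = false := by decide
      rw [hne]
      simp only [Bool.false_eq_true, if_false]
      rw [pvPart_set l r f i j hjlt hb']
      rw [pv_set_map_range]
      simp only [Prod.mk.injEq]
      constructor
      · apply pv_map_range_congr
        intro t ht
        by_cases h1 : t = i
        · simp [h1]
        · by_cases h2 : t < i <;> simp [h1, h2]
      · omega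
  -- from the invariant to the full inner loop
  by_cases hif : i < f
  · have hlenr : pvLen r f i = r := by simp [pvLen, hif]
    have := inv r (by omega)
    rw [this]
    simp only [Prod.mk.injEq]
    constructor
    · apply pv_map_range_congr
      intro t ht
      by_cases h2 : t < i
      · rw [if_pos h2, if_pos (show t < i + 1 by omega)]
      · by_cases h1 : t = i
        · rw [if_neg h2, if_pos h1, if_pos (show t < i + 1 by omega), h1]
          exact pvPart_last_full l r f i hif hlen
        · rw [if_neg h2, if_neg h1, if_neg (show ¬ t < i + 1 by omega)]
    · rw [pvStart, pvLen, if_pos hif]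
  · have hlenr : pvLen r f i = r - 1 := by simp [pvLen, hif]
    have hsplit : List.range r = List.range (r - 1) ++ [r - 1] := by
      rw [← List.range_succ]
      congr 1
      omega
    rw [hsplit, List.foldl_append, inv (r - 1) (by omega)]
    simp only [List.foldl_cons, List.foldl_nil]
    have hrow : ∀ (d : List String),
        ((List.range k).map (fun t => if t < i then pvFinal l r f t
          else if t = i then pvPart l r f i (r - 1) else pvInit r f t)).getD i d
        = pvPart l r f i (r - 1) := by
      intro d
      rw [pv_getD_map_range _ _ _ _ hik]
      simp
    rw [hrow]
    have hcell : (pvPart l r f i (r - 1)).getD (r - 1) "" = "#" := by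
      rw [pvPart_last_short l r f i hif hlen]
      rw [pvFinal, if_neg hif, List.getD_eq_getElem?_getD]
      rw [List.getElem?_append_right (by simp [hlen, pvLen, hif])]
      simp [hlen, pvLen, hif]
    rw [hcell]
    simp only [BEq.rfl, if_true]
    simp only [Prod.mk.injEq]
    constructor
    · apply pv_map_range_congr
      intro t ht
      by_cases h2 : t < i
      · rw [if_pos h2, if_pos (show t < i + 1 by omega)]
      · by_cases h1 : t = i
        · rw [if_neg h2, if_pos h1, if_pos (show t < i + 1 by omega), h1]
          exact pvPart_last_short l r f i hif hlen
        · rw [if_neg h2, if_neg h1, if_neg (show ¬ t < i + 1 by omega)]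
    · rw [pvStart, pvLen, if_neg hif]
theorem pvA_fill (l : List Char) (r f k : Nat) (hr : 0 < r) (hb : pvStart r f k ≤ l.length) :
    (List.range k).foldl (fun (st : List (List String) × Nat) i =>
        (List.range r).foldl (fun (st : List (List String) × Nat) j =>
          if (st.1.getD i []).getD j "" == "#" then st
          else (st.1.set i ((st.1.getD i []).set j (String.ofList [l.getD st.2 ' '])), st.2 + 1)) st)
      ((List.range k).map (pvInit r f), 0)
      = ((List.range k).map (pvFinal l r f), pvStart r f k) := by
  have inv : ∀ m, m ≤ k →
      (List.range m).foldl (fun (st : List (List String) × Nat) i =>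
        (List.range r).foldl (fun (st : List (List String) × Nat) j =>
          if (st.1.getD i []).getD j "" == "#" then st
          else (st.1.set i ((st.1.getD i []).set j (String.ofList [l.getD st.2 ' '])), st.2 + 1)) st)
      ((List.range k).map (pvInit r f), 0)
      = ((List.range k).map (fun t => if t < m then pvFinal l r f t else pvInit r f t),
         pvStart r f m) := by
    intro m hm
    induction m with
    | zero =>
      simp only [List.range_zero, List.foldl_nil]
      refine Prod.ext ?_ rfl
      apply pv_map_range_congr
      intro t ht
      rw [if_neg (by omega)]
    | succ m ih =>
      rw [List.range_succ, List.foldl_append, ih (by omega)]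
      simp only [List.foldl_cons, List.foldl_nil]
      exact pvA_fillrow l r f k m (by omega) hr
        (le_trans (pvStart_mono r f hm) hb)
  rw [inv k le_rfl]
  refine Prod.ext ?_ rfl
  apply pv_map_range_congr
  intro t ht
  rw [if_pos ht]

theorem pvFinal_getD (l : List Char) (r f i j : Nat) (hj : j < r)
    (hlen : (pvChunk l r f i).length = pvLen r f i) (hrf : pvLen r f i ≤ r) :
    (pvFinal l r f i).getD j "" =
      if j < pvLen r f i then pvSing ((pvChunk l r f i).getD j ' ') else "#" := by
  rw [pvFinal, List.getD_eq_getElem?_getD]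
  by_cases h : j < pvLen r f i
  · rw [if_pos h, List.getElem?_append_left (by simp [hlen]; omega)]
    rw [List.getElem?_map]
    have : j < (pvChunk l r f i).length := by omega
    simp [this, List.getD_eq_getElem?_getD]
  · rw [if_neg h, List.getElem?_append_right (by simp [hlen]; omega)]
    have hif : ¬ i < f := by
      intro hc
      simp [pvLen, hc] at h
      omega
    rw [if_neg hif]
    have : j - ((pvChunk l r f i).map pvSing).length = 0 := by
      simp [hlen, pvLen, hif] at *
      omega
    rw [this]
    rfl
theorem pv_filterMap_eq_flatMap {α β : Type} (f : α → Option β) (xs : List α) :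
    xs.filterMap f = xs.flatMap (fun x => (f x).toList) := by
  induction xs with
  | nil => rfl
  | cons x xs ih =>
    cases h : f x <;> simp [List.filterMap_cons, h, ih]

theorem pv_flatMap_range_congr {α : Type} (g g' : Nat → List α) (k : Nat)
    (h : ∀ t, t < k → g t = g' t) :
    (List.range k).flatMap g = (List.range k).flatMap g' := by
  apply List.flatMap_congr
  intro t ht
  exact h t (List.mem_range.mp ht)

theorem pvStart_last' (n q f k : Nat) (hq : n = k * q + f) (hf : f ≤ k) :
    pvStart (q + 1) f k = n := by
  rw [pvStart_closed]
  have h2 : min k f = f := by omega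
  rw [h2]
  have e2 : (k - f) * (q + 1 - 1) = k * q - f * q := by
    simp [Nat.sub_mul]
  have e3 : f * q ≤ k * q := Nat.mul_le_mul_right _ (by omega)
  have e1 : f * (q + 1) = f * q + f := by ring
  omega
theorem pv_flatMap_sing {α β : Type} (g : α → β) (xs : List α) :
    xs.flatMap (fun i => [g i]) = xs.map g := by
  induction xs <;> simp_all

theorem pv_main' (l : List Char) (k q f m : Nat) (hk : 0 < k) (hf : f < k)
    (hm : k = f + m) (hn : l.length = k * q + f) :
    (((List.range (q + 1)).flatMap (fun j =>
        (List.range k).map (fun i => (pvFinal l (q + 1) f i).getD j ""))).flatMap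
        String.toList).take l.length
    = (List.range (q + 1)).flatMap (fun j =>
        (List.range k).filterMap (fun i => (pvChunk l (q + 1) f i)[j]?)) := by
  have hstartk : pvStart (q + 1) f k = l.length := pvStart_last' _ q f k hn (by omega)
  have hb : ∀ i, i < k → pvStart (q + 1) f i + pvLen (q + 1) f i ≤ l.length := by
    intro i hi
    have h1 : pvStart (q + 1) f (i + 1) ≤ pvStart (q + 1) f k := pvStart_mono _ _ (by omega)
    have h2 : pvStart (q + 1) f (i + 1) = pvStart (q + 1) f i + pvLen (q + 1) f i := rfl
    omega
  have hlen : ∀ i, i < k → (pvChunk l (q + 1) f i).length = pvLen (q + 1) f i :=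
    fun i hi => pvChunk_length _ _ _ _ (hb i hi)
  have hlenle : ∀ i, q ≤ pvLen (q + 1) f i ∧ pvLen (q + 1) f i ≤ q + 1 := by
    intro i
    unfold pvLen
    split_ifs <;> omega
  -- the A-side column j, as a flatMap of one-character cells
  have hAcol : ∀ j, j < q + 1 →
      (List.range k).flatMap (fun i => ((pvFinal l (q + 1) f i).getD j "").toList)
      = (List.range k).flatMap (fun i =>
          if j < pvLen (q + 1) f i then [(pvChunk l (q + 1) f i).getD j ' '] else ['#']) := by
    intro j hj
    apply pv_flatMap_range_congr
    intro i hi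
    rw [pvFinal_getD l (q + 1) f i j hj (hlen i hi) (hlenle i).2]
    by_cases h : j < pvLen (q + 1) f i
    · rw [if_pos h, if_pos h]; simp [pvSing]
    · rw [if_neg h, if_neg h]; simp
  -- the B-side column j
  have hBcol : ∀ j,
      (List.range k).filterMap (fun i => (pvChunk l (q + 1) f i)[j]?)
      = (List.range k).flatMap (fun i =>
          if j < pvLen (q + 1) f i then [(pvChunk l (q + 1) f i).getD j ' '] else []) := by
    intro j
    rw [pv_filterMap_eq_flatMap]
    apply pv_flatMap_range_congr
    intro i hi
    by_cases h : j < pvLen (q + 1) f i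
    · have hjl : j < (pvChunk l (q + 1) f i).length := by rw [hlen i hi]; exact h
      rw [List.getElem?_eq_getElem hjl, if_pos h]
      simp [List.getD_eq_getElem?_getD, List.getElem?_eq_getElem hjl]
    · have hjl : ¬ j < (pvChunk l (q + 1) f i).length := by rw [hlen i hi]; exact h
      rw [List.getElem?_eq_none (by omega), if_neg h]
      rfl
  -- columns before the last are full on both sides
  have hcol_lt : ∀ j, j < q →
      (List.range k).flatMap (fun i =>
          if j < pvLen (q + 1) f i then [(pvChunk l (q + 1) f i).getD j ' '] else ['#'])
      = (List.range k).flatMap (fun i =>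
          if j < pvLen (q + 1) f i then [(pvChunk l (q + 1) f i).getD j ' '] else []) := by
    intro j hj
    apply pv_flatMap_range_congr
    intro i hi
    have := (hlenle i).1
    rw [if_pos (by omega : j < pvLen (q + 1) f i), if_pos (by omega : j < pvLen (q + 1) f i)]
  -- the last column: A appends the m = k - f sentinel characters after B's cells
  have hlast :
      (List.range k).flatMap (fun i =>
          if q < pvLen (q + 1) f i then [(pvChunk l (q + 1) f i).getD q ' '] else ['#'])
      = (List.range k).flatMap (fun i =>
          if q < pvLen (q + 1) f i then [(pvChunk l (q + 1) f i).getD q ' '] else [])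
        ++ List.replicate m '#' := by
    rw [hm, List.range_add, List.flatMap_append, List.flatMap_append,
        List.flatMap_map, List.flatMap_map]
    have hshort : ∀ t, ¬ q < pvLen (q + 1) f (f + t) := by
      intro t
      unfold pvLen
      rw [if_neg (by omega)]
      omega
    have h1 : (List.range m).flatMap
        (fun a => if q < pvLen (q + 1) f (f + a) then [(pvChunk l (q + 1) f (f + a)).getD q ' ']
          else ['#']) = List.replicate m '#' := by
      have hc : ∀ t, t < m → (fun a => if q < pvLen (q + 1) f (f + a) then
          [(pvChunk l (q + 1) f (f + a)).getD q ' '] else ['#']) t = ['#'] := by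
        intro t ht
        simp only []
        rw [if_neg (hshort t)]
      rw [pv_flatMap_range_congr _ (fun _ => ['#']) m hc, pv_flatMap_sing]
      simp [List.map_const']
    have h2 : (List.range m).flatMap
        (fun a => if q < pvLen (q + 1) f (f + a) then [(pvChunk l (q + 1) f (f + a)).getD q ' ']
          else []) = ([] : List Char) := by
      have hc : ∀ t, t < m → (fun a => if q < pvLen (q + 1) f (f + a) then
          [(pvChunk l (q + 1) f (f + a)).getD q ' '] else []) t = ([] : List Char) := by
        intro t ht
        simp only []
        rw [if_neg (hshort t)]
      rw [pv_flatMap_range_congr _ (fun _ => []) m hc]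
      simp
    rw [h1, h2]
    have hpre : (List.range f).flatMap (fun i =>
        if q < pvLen (q + 1) f i then [(pvChunk l (q + 1) f i).getD q ' '] else ['#'])
        = (List.range f).flatMap (fun i =>
        if q < pvLen (q + 1) f i then [(pvChunk l (q + 1) f i).getD q ' '] else []) := by
      apply pv_flatMap_range_congr
      intro t ht
      have : q < pvLen (q + 1) f t := by unfold pvLen; rw [if_pos ht]; omega
      rw [if_pos this, if_pos this]
    rw [hpre]
    simp
  -- length of B's output: all of l is used
  have hcolfull : ∀ j, j < q →
      (List.range k).flatMap (fun i =>
        if j < pvLen (q + 1) f i then [(pvChunk l (q + 1) f i).getD j ' '] else [])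
      = (List.range k).map (fun i => (pvChunk l (q + 1) f i).getD j ' ') := by
    intro j hj
    rw [pv_flatMap_range_congr _ (fun i => [(pvChunk l (q + 1) f i).getD j ' ']) k
      (by intro t ht
          have := (hlenle t).1
          rw [if_pos (by omega)]),
      pv_flatMap_sing]
  have hlastB : (List.range k).flatMap (fun i =>
        if q < pvLen (q + 1) f i then [(pvChunk l (q + 1) f i).getD q ' '] else [])
      = (List.range f).map (fun i => (pvChunk l (q + 1) f i).getD q ' ') := by
    rw [hm, List.range_add, List.flatMap_append, List.flatMap_map]
    have hshort : ∀ t, ¬ q < pvLen (q + 1) f (f + t) := by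
      intro t
      unfold pvLen
      rw [if_neg (by omega)]
      omega
    have h2 : (List.range m).flatMap
        (fun a => if q < pvLen (q + 1) f (f + a) then [(pvChunk l (q + 1) f (f + a)).getD q ' ']
          else []) = ([] : List Char) := by
      rw [pv_flatMap_range_congr _ (fun _ => []) m
        (by intro t ht
            simp only []
            rw [if_neg (hshort t)])]
      simp
    rw [h2]
    rw [pv_flatMap_range_congr _ (fun i => [(pvChunk l (q + 1) f i).getD q ' ']) f
      (by intro t ht
          have : q < pvLen (q + 1) f t := by unfold pvLen; rw [if_pos ht]; omega
          rw [if_pos this]),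
      pv_flatMap_sing]
    simp
  have hlenB : ((List.range (q + 1)).flatMap (fun j => (List.range k).flatMap (fun i =>
      if j < pvLen (q + 1) f i then [(pvChunk l (q + 1) f i).getD j ' '] else []))).length
      = l.length := by
    rw [List.range_succ, List.flatMap_append, List.length_append, List.flatMap_singleton]
    have h1 : ((List.range q).flatMap (fun j => (List.range k).flatMap (fun i =>
        if j < pvLen (q + 1) f i then [(pvChunk l (q + 1) f i).getD j ' '] else []))).length
        = q * k := by
      rw [List.length_flatMap]
      rw [List.map_congr_left (fun j hj => by
        rw [hcolfull j (List.mem_range.mp hj)]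
        simp : ∀ j ∈ List.range q, ((List.range k).flatMap (fun i =>
          if j < pvLen (q + 1) f i then [(pvChunk l (q + 1) f i).getD j ' '] else [])).length
          = (fun _ => k) j)]
      simp [List.map_const', mul_comm]
    have h2 : ((List.range k).flatMap (fun i =>
        if q < pvLen (q + 1) f i then [(pvChunk l (q + 1) f i).getD q ' '] else [])).length
        = f := by
      rw [hlastB]
      simp
    rw [h1, h2, hn]
    have : q * k = k * q := mul_comm _ _
    omega
  -- assemble
  rw [List.flatMap_assoc]
  have hA : (List.range (q + 1)).flatMap (fun j =>
        ((List.range k).map (fun i => (pvFinal l (q + 1) f i).getD j "")).flatMap String.toList)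
      = (List.range (q + 1)).flatMap (fun j => (List.range k).flatMap (fun i =>
          if j < pvLen (q + 1) f i then [(pvChunk l (q + 1) f i).getD j ' '] else ['#'])) := by
    apply pv_flatMap_range_congr
    intro j hj
    rw [List.flatMap_map]
    exact hAcol j hj
  rw [hA]
  have hB : (List.range (q + 1)).flatMap (fun j =>
        (List.range k).filterMap (fun i => (pvChunk l (q + 1) f i)[j]?))
      = (List.range (q + 1)).flatMap (fun j => (List.range k).flatMap (fun i =>
          if j < pvLen (q + 1) f i then [(pvChunk l (q + 1) f i).getD j ' '] else [])) := by
    apply pv_flatMap_range_congr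
    intro j hj
    exact hBcol j
  rw [hB]
  rw [List.range_succ, List.flatMap_append, List.flatMap_append,
      List.flatMap_singleton, List.flatMap_singleton]
  have hpre : (List.range q).flatMap (fun j => (List.range k).flatMap (fun i =>
        if j < pvLen (q + 1) f i then [(pvChunk l (q + 1) f i).getD j ' '] else ['#']))
      = (List.range q).flatMap (fun j => (List.range k).flatMap (fun i =>
        if j < pvLen (q + 1) f i then [(pvChunk l (q + 1) f i).getD j ' '] else [])) := by
    apply pv_flatMap_range_congr
    intro j hj
    exact hcol_lt j hj
  rw [hpre, hlast, ← List.append_assoc]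
  rw [List.range_succ, List.flatMap_append, List.length_append, List.flatMap_singleton] at hlenB
  rw [show l.length = ((List.range q).flatMap (fun j => (List.range k).flatMap (fun i =>
        if j < pvLen (q + 1) f i then [(pvChunk l (q + 1) f i).getD j ' '] else []))
      ++ (List.range k).flatMap (fun i =>
        if q < pvLen (q + 1) f i then [(pvChunk l (q + 1) f i).getD q ' '] else [])).length
    from by rw [List.length_append]; omega]
  exact List.take_left
theorem pv_join_nil_flatten (ps : List (List Char)) : PySem.Chars.join [] ps = ps.flatten := by
  induction ps with
  | nil => simp [PySem.Chars.join_nil]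
  | cons p ps ih =>
    cases ps with
    | nil => simp [PySem.Chars.join_singleton]
    | cons q ps' => rw [PySem.Chars.join_cons_cons] at *; simp_all

theorem pv_ports_eq (c : String) (key : Int) : decrypt_skytale c key = decrypt_skytale_alt c key := by
  by_cases hk0 : key.toNat = 0
  · simp [decrypt_skytale, decrypt_skytale_alt, hk0]
  · set l := c.toList with hl
    set n := l.length with hn0
    set k := key.toNat with hkk
    set q := n / k with hq
    set f := n % k with hfd
    have hk : 0 < k := by omega
    have hf : f < k := Nat.mod_lt _ hk
    have hdm : k * q + f = n := Nat.div_add_mod n k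
    have hrk : (q + 1) * k = k * q + k := by ring
    have he : (q + 1) * k - n = k - f := by omega
    have hstartk : pvStart (q + 1) f k = n := pvStart_last' n q f k (by omega) (by omega)
    simp only [decrypt_skytale, decrypt_skytale_alt]
    rw [← hl, ← hn0, ← hkk, ← hq, ← hfd, he]
    rw [pvA_mark k (q + 1) f (le_of_lt hf) (Nat.succ_pos q)]
    rw [pvA_fill l (q + 1) f k (Nat.succ_pos q) (le_of_eq (hstartk.trans hn0))]
    rw [pvB_fold l (q + 1) f k]
    congr 1
    rw [PySem.Str.toList_join]
    have hsep : ("" : String).toList = [] := rfl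
    rw [hsep, pv_join_nil_flatten, ← List.flatMap_def]
    have hgetA : (List.range (q + 1)).flatMap (fun j =>
          (List.range k).map (fun i =>
            (((List.range k).map (pvFinal l (q + 1) f)).getD i []).getD j ""))
        = (List.range (q + 1)).flatMap (fun j =>
          (List.range k).map (fun i => (pvFinal l (q + 1) f i).getD j "")) := by
      apply pv_flatMap_range_congr
      intro j hj
      apply pv_map_range_congr
      intro i hi
      rw [pv_getD_map_range _ _ _ _ hi]
    rw [hgetA]
    have hgetB : (List.range (q + 1)).flatMap (fun j =>
          (List.range k).filterMap (fun i =>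
            (((List.range k).map (pvChunk l (q + 1) f)).getD i [])[j]?))
        = (List.range (q + 1)).flatMap (fun j =>
          (List.range k).filterMap (fun i => (pvChunk l (q + 1) f i)[j]?)) := by
      apply pv_flatMap_range_congr
      intro j hj
      apply List.filterMap_congr
      intro i hi
      rw [pv_getD_map_range _ _ _ _ (List.mem_range.mp hi)]
    rw [hgetB]
    exact pv_main' l k q f (k - f) hk hf (by omega) (by omega)

-- ===== VERDICT (by name: the statement is the Claim_ definition above) =====
theorem decrypt_skytale_spec : Claim_equal_decrypt_skytale := by
  intro c key _ _
  unfold Spec_decrypt_skytale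
  exact pv_ports_eq c key
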